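-- pv_equiv track=rewrite | github.com/louisuss/Algorithms-Code-Upload | Python/Programmers/Level2/종이접기.py | solution
-- ===== SOURCE A (Python) =====
-- def solution(n):
--     dp = [[0], [0], [0, 0, 1]]
--
--     def reverse_data(k):
--         k.reverse()
--         a = []
--         for i in k:
--             if i == 1:
--                 a.append(0)
--             else:
--                 a.append(1)
--         return a
--
--     for i in range(3, n+1):
--         dp.append(dp[i-1] + [0] + reverse_data(dp[i-1]))
--
--     return dp[n]
-- ===== SOURCE B (Python) =====
-- def solution(n):
--     if n < 3:
--         return [[0], [0], [0, 0, 1]][n]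
--     res = []
--     for k in range(1, 2 ** n):
--         b = k
--         while b % 2 == 0:
--             b //= 2
--         res.append(0 if b % 4 == 1 else 1)
--     return res
-- ===== Notes on version B (the rewrite author's own statement) =====
-- stated objective: alternative
-- what changed: B computes each crease value directly from its 1-based index k (strip trailing zero bits, test the odd part mod 4) instead of building every folding level bottom-up from the previous level via reverse-and-complement.
import Mathlib
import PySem

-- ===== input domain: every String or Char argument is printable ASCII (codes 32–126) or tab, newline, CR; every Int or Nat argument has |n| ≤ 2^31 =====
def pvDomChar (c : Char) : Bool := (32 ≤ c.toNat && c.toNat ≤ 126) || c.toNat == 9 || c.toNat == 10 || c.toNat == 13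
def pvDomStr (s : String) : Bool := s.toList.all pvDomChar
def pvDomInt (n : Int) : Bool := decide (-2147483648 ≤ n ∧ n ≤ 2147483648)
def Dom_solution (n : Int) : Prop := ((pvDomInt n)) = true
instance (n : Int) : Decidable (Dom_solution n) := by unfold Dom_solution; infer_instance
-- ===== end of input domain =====

-- B computes each crease directly from its index (odd part mod 4) instead of A's level-by-level
-- reverse-and-complement construction; same cost class, different algorithm ("alternative").
-- (A's reverse_data reverses dp[i-1] in place, but that entry is never read again, so the
-- returned value dp[n] is unaffected; the port below therefore keeps dp entries unreversed.)

-- ===== PORT A =====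
-- reverse_data: k.reverse(); then append 0 for each 1 and 1 otherwise
def revData (k : List Int) : List Int :=
  k.reverse.foldl (fun a i => if i = 1 then a ++ [(0 : Int)] else a ++ [1]) []

def solution (n : Int) : List Int :=
  let dp : List (List Int) :=
    (PySem.List.pyRange 3 (n + 1) 1).foldl
      (fun dp i =>
        dp ++ [PySem.List.pyGetD dp (i - 1) [] ++ [0] ++ revData (PySem.List.pyGetD dp (i - 1) [])])
      [[0], [0], [0, 0, 1]]
  PySem.List.pyGetD dp n []   -- dp[n]; IndexError (n ≤ -4) excluded by Pre_solution

-- ===== PORT B =====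
-- while b % 2 == 0: b //= 2   (the '0 < b' conjunct only makes the loop total in Lean; in B, b = k ≥ 1 always)
def oddPart (b : Int) : Int :=
  if _h : PySem.Int.mod b 2 = 0 ∧ 0 < b then oddPart (PySem.Int.floordiv b 2) else b
termination_by b.toNat
decreasing_by
  rw [PySem.Int.floordiv_eq_ediv_of_pos (by omega)]
  omega

def solution_alt (n : Int) : List Int :=
  if n < 3 then
    PySem.List.pyGetD [[(0 : Int)], [0], [0, 0, 1]] n []   -- base[n]; IndexError (n ≤ -4) excluded by Pre_solution
  else
    (PySem.List.pyRange 1 (2 ^ n.toNat) 1).foldl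
      (fun res k =>
        res ++ [if PySem.Int.mod (oddPart k) 4 = 1 then (0 : Int) else 1])
      []

-- ===== PRECONDITION & SPEC =====
-- A raises IndexError (negative index past the base list) exactly when n ≤ -4; B raises there too.
def Pre_solution (n : Int) : Prop := -3 ≤ n
instance (n : Int) : Decidable (Pre_solution n) := by unfold Pre_solution; infer_instance
def pvWitness_solution : Int := (4)

def Spec_solution (n : Int) (out : List Int) : Prop := out = solution_alt n
instance (n : Int) (out : List Int) : Decidable (Spec_solution n out) := by unfold Spec_solution; infer_instance

-- ===== CLAIM (what is proved, stated in full; the proofs are below) =====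
def Claim_equal_solution : Prop := ∀ (n : Int), Dom_solution n → Pre_solution n → Spec_solution n (solution n)

-- ===== LEMMAS AND PROOFS =====

-- Nat model of the inner while loop
def oddN (k : Nat) : Nat :=
  if k % 2 = 0 ∧ 0 < k then oddN (k / 2) else k
termination_by k
decreasing_by omega

-- value of the regular paper-folding sequence at 1-based index k
def pf (k : Nat) : Int := if oddN k % 4 = 1 then 0 else 1

-- the full sequence for n folds
def pfList (m : Nat) : List Int := (List.range (2 ^ m - 1)).map (fun j => pf (j + 1))

lemma oddN_two_mul (m : Nat) (hm : 0 < m) : oddN (2 * m) = oddN m := by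
  rw [oddN, if_pos ⟨by omega, by omega⟩, Nat.mul_div_cancel_left m (by norm_num)]

lemma oddN_odd (k : Nat) (hk : k % 2 = 1) : oddN k = k := by
  rw [oddN]; simp [hk]

lemma oddN_pow (m : Nat) : oddN (2 ^ m) = 1 := by
  induction m with
  | zero => rw [pow_zero, oddN]; norm_num
  | succ m ih =>
      rw [pow_succ, mul_comm, oddN_two_mul _ (by positivity)]
      exact ih

lemma pf_pow (m : Nat) : pf (2 ^ m) = 0 := by
  simp [pf, oddN_pow]

-- complement symmetry: pf (2^m + j) = complement of pf (2^m - j) for 0 < j < 2^m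
lemma pfList_two : pfList 2 = [0, 0, 1] := by
  have h1 : oddN 1 = 1 := by rw [oddN]; norm_num
  have h2 : oddN 2 = 1 := by rw [oddN]; norm_num [h1]
  have h3 : oddN 3 = 3 := by rw [oddN]; norm_num
  norm_num [pfList, List.range_succ, pf, h1, h2, h3]

lemma pf_compl (m : Nat) : ∀ j, 0 < j → j < 2 ^ m →
    pf (2 ^ m + j) = (if pf (2 ^ m - j) = 1 then 0 else 1) := by
  induction m with
  | zero => intro j h1 h2; omega
  | succ m ih =>
      intro j h1 h2
      rcases Nat.even_or_odd j with ⟨i, hi⟩ | hodd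
      · -- j = 2*i even: halve everything
        have hi0 : 0 < i := by omega
        have hilt : i < 2 ^ m := by rw [pow_succ] at h2; omega
        have e1 : 2 ^ (m + 1) + j = 2 * (2 ^ m + i) := by rw [pow_succ]; omega
        have e2 : 2 ^ (m + 1) - j = 2 * (2 ^ m - i) := by rw [pow_succ]; omega
        have h2m : 0 < 2 ^ m - i := by omega
        unfold pf
        rw [e1, e2, oddN_two_mul _ (by positivity), oddN_two_mul _ h2m]
        exact ih i hi0 hilt
      · -- j odd: both sides are odd, compare mod 4
        have hj2 : j % 2 = 1 := Nat.odd_iff.mp hodd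
        have ho1 : (2 ^ (m + 1) + j) % 2 = 1 := by
          have : 2 ^ (m + 1) % 2 = 0 := by
            simp [pow_succ]
          omega
        have ho2 : (2 ^ (m + 1) - j) % 2 = 1 := by
          have : 2 ^ (m + 1) % 2 = 0 := by
            simp [pow_succ]
          omega
        unfold pf
        rw [oddN_odd _ ho1, oddN_odd _ ho2]
        rcases Nat.eq_zero_or_pos m with hm | hm
        · subst hm
          interval_cases j
          decide
        · -- m ≥ 1 : 2^(m+1) divisible by 4
          obtain ⟨c, hc⟩ : ∃ c, 2 ^ (m + 1) = 4 * c := ⟨2 ^ (m - 1), by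
            rw [show m + 1 = 2 + (m - 1) by omega, pow_add]; ring⟩
          rw [hc] at h2 ⊢
          have h4 : j % 4 = 1 ∨ j % 4 = 3 := by omega
          rcases h4 with h4 | h4 <;>
            simp [Nat.add_mod, h4] <;> omega

-- reverse_data computes the reversed complement (foldl-append as map)
lemma revData_eq (k : List Int) :
    revData k = k.reverse.map (fun i => if i = 1 then 0 else 1) := by
  unfold revData
  rw [show (fun (a : List Int) (i : Int) => if i = 1 then a ++ [(0 : Int)] else a ++ [1])
        = (fun (a : List Int) (i : Int) => a ++ [if i = 1 then (0 : Int) else 1]) by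
      funext a i; split <;> rfl]
  simpa using PySem.List.foldl_append_singleton_eq_map
    (fun (i : Int) => if i = 1 then (0 : Int) else 1) k.reverse []

lemma length_pfList (m : Nat) : (pfList m).length = 2 ^ m - 1 := by
  simp [pfList]

-- the interleave recurrence A builds with
lemma pfList_succ (m : Nat) :
    pfList (m + 1) = pfList m ++ [0] ++ revData (pfList m) := by
  have hpos : 1 ≤ 2 ^ m := Nat.one_le_two_pow
  rw [revData_eq]
  apply List.ext_getElem
  · simp [pfList, pow_succ]; omega
  · intro t h1 h2
    have ht : t < 2 ^ (m + 1) - 1 := by simpa [length_pfList] using h1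
    by_cases hc1 : t < 2 ^ m - 1
    · -- left copy
      rw [List.getElem_append_left (by simp [length_pfList]; omega)]
      rw [List.getElem_append_left (by simpa [length_pfList] using hc1)]
      simp [pfList]
    · by_cases hc2 : t = 2 ^ m - 1
      · -- middle zero = pf (2^m)
        rw [List.getElem_append_left (by simp [length_pfList]; omega)]
        rw [List.getElem_append_right (by simp [length_pfList]; omega)]
        simp [pfList, hc2]
        rw [show 2 ^ m - 1 + 1 = 2 ^ m from by omega, pf_pow]
      · -- right copy: complement of reversed left part
        have hgt : 2 ^ m - 1 < t := by omega
        rw [List.getElem_append_right (by simp [length_pfList]; omega)]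
        simp only [pfList, List.getElem_map, List.getElem_reverse, List.getElem_range,
          List.length_map, List.length_range, List.length_append, List.length_cons,
          List.length_nil]
        rw [show 2 ^ m - 1 - 1 - (t - (2 ^ m - 1 + (0 + 1))) + 1
              = 2 ^ m - (t + 1 - 2 ^ m) from by omega]
        have := pf_compl m (t + 1 - 2 ^ m) (by omega) (by rw [pow_succ] at ht; omega)
        rw [show 2 ^ m + (t + 1 - 2 ^ m) = t + 1 from by omega] at this
        rw [this]

-- ===== A side: the dp fold returns pfList =====

def dpStep (dp : List (List Int)) (i : Int) : List (List Int) :=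
  dp ++ [PySem.List.pyGetD dp (i - 1) [] ++ [0] ++ revData (PySem.List.pyGetD dp (i - 1) [])]

def dpF (m : Nat) : List (List Int) :=
  (PySem.List.pyRange 3 ((m : Int) + 1) 1).foldl dpStep [[0], [0], [0, 0, 1]]

lemma dpF_inv (m : Nat) (hm : 2 ≤ m) :
    (dpF m).length = m + 1 ∧ PySem.List.pyGetD (dpF m) (m : Int) [] = pfList m := by
  induction m with
  | zero => omega
  | succ m ih =>
      rcases Nat.lt_or_ge m 2 with hlt | hge
      · -- base: m + 1 = 2
        have : m = 1 := by omega
        subst this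
        constructor
        · decide
        · rw [pfList_two]; decide
      · obtain ⟨ihl, ihv⟩ := ih hge
        have hrange : PySem.List.pyRange 3 ((m : Int) + 1 + 1) 1
            = PySem.List.pyRange 3 ((m : Int) + 1) 1 ++ [(m : Int) + 1] := by
          have := PySem.List.pyRange_one_succ_right (a := 3) (b := (m : Int) + 1) (by omega)
          simpa using this
        have hstep : dpF (m + 1) = dpStep (dpF m) ((m : Int) + 1) := by
          unfold dpF
          push_cast
          rw [hrange, List.foldl_append]
          rfl
        have hprev : PySem.List.pyGetD (dpF m) ((m : Int) + 1 - 1) [] = pfList m := by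
          rw [show (m : Int) + 1 - 1 = (m : Int) by ring]; exact ihv
        constructor
        · rw [hstep]; unfold dpStep; simp [ihl]
        · rw [hstep]; unfold dpStep
          rw [hprev]
          simp only [PySem.List.pyGetD_natCast]
          rw [List.getD_append_right _ _ _ _ (by omega)]
          simp [ihl, pfList_succ]

lemma solution_eq_pfList (m : Nat) (hm : 2 ≤ m) : solution (m : Int) = pfList m := by
  have h := (dpF_inv m hm).2
  unfold solution
  exact h

-- ===== B side: the index formula computes pfList =====

lemma oddPart_natCast (k : Nat) : oddPart (k : Int) = (oddN k : Int) := by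
  induction k using Nat.strong_induction_on with
  | _ k ih =>
      have hmod : PySem.Int.mod (k : Int) 2 = ((k % 2 : Nat) : Int) := by
        exact_mod_cast PySem.Int.mod_natCast k 2
      have hdiv : PySem.Int.floordiv (k : Int) 2 = ((k / 2 : Nat) : Int) := by
        exact_mod_cast PySem.Int.floordiv_natCast k 2
      rw [oddPart, oddN]
      by_cases h : k % 2 = 0 ∧ 0 < k
      · have hc : PySem.Int.mod (k : Int) 2 = 0 ∧ 0 < (k : Int) :=
          ⟨by rw [hmod]; exact_mod_cast h.1, by exact_mod_cast h.2⟩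
        rw [dif_pos hc, if_pos h, hdiv]
        exact ih (k / 2) (by omega)
      · have hc : ¬ (PySem.Int.mod (k : Int) 2 = 0 ∧ 0 < (k : Int)) := by
          intro hx
          exact h ⟨by have h1 := hx.1; rw [hmod] at h1; exact_mod_cast h1, by exact_mod_cast hx.2⟩
        rw [dif_neg hc, if_neg h]

lemma solution_alt_eq_pfList (m : Nat) (hm : 3 ≤ m) : solution_alt (m : Int) = pfList m := by
  unfold solution_alt
  rw [if_neg (by omega)]
  rw [PySem.List.foldl_append_singleton_eq_map]
  rw [show ((m : Int)).toNat = m by omega]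
  rw [PySem.List.pyRange_one]
  rw [List.map_map]
  unfold pfList
  have h2 : ((2 : Int)) ^ m = ((2 ^ m : Nat) : Int) := by push_cast; ring
  rw [show ((2 : Int) ^ m - 1).toNat = 2 ^ m - 1 from by
    rw [h2]
    have : 1 ≤ 2 ^ m := Nat.one_le_two_pow
    omega]
  apply List.map_congr_left
  intro j hj
  simp only [Function.comp_apply]
  have : (1 : Int) + (j : Int) = ((j + 1 : Nat) : Int) := by push_cast; ring
  rw [this, oddPart_natCast]
  unfold pf
  have hmod : PySem.Int.mod ((oddN (j + 1) : Nat) : Int) 4 = ((oddN (j + 1) % 4 : Nat) : Int) := by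
    exact_mod_cast PySem.Int.mod_natCast (oddN (j + 1)) 4
  rw [hmod]
  by_cases h : oddN (j + 1) % 4 = 1
  · rw [if_pos (by exact_mod_cast h), if_pos h]
  · rw [if_neg (by exact_mod_cast h), if_neg h]

-- ===== VERDICT (by name: the statement is the Claim_ definition above) =====
theorem solution_spec : Claim_equal_solution := by
  intro n _ hpre
  unfold Spec_solution
  by_cases hlt : n < 3
  · -- finitely many small cases: -3 ≤ n ≤ 2
    unfold Pre_solution at hpre
    interval_cases n <;> decide
  · have hm : n = ((n.toNat : Nat) : Int) := by omega
    rw [hm, solution_eq_pfList n.toNat (by omega), solution_alt_eq_pfList n.toNat (by omega)]
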